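-- pv_equiv track=rewrite | github.com/Dirmalyay/start_py | two_list.py | uniq_elem
-- ===== SOURCE A (Python) =====
-- def uniq_elem(l1, l2):
--     list_res = []
--     for i in l1:
--         for j in l2:
--             if i == j:
--                 list_res.append(j)
--             else:
--                 continue
--     return list_res
-- ===== SOURCE B (Python) =====
-- def uniq_elem(l1, l2):
--     counts = {}
--     for j in l2:
--         counts[j] = counts.get(j, 0) + 1
--     list_res = []
--     for i in l1:
--         list_res.extend([i] * counts.get(i, 0))
--     return list_res
-- ===== Notes on version B (the rewrite author's own statement) =====
-- stated objective: alternative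
-- what changed: Replaced the nested scan of l2 for every l1 element by a single counting pass over l2 into a dict, then one pass over l1 emitting each value repeated by its count; the nested loop disappears (measured ~2x on the probe but not confirmed at the largest size, so no speed claim).
import Mathlib
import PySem

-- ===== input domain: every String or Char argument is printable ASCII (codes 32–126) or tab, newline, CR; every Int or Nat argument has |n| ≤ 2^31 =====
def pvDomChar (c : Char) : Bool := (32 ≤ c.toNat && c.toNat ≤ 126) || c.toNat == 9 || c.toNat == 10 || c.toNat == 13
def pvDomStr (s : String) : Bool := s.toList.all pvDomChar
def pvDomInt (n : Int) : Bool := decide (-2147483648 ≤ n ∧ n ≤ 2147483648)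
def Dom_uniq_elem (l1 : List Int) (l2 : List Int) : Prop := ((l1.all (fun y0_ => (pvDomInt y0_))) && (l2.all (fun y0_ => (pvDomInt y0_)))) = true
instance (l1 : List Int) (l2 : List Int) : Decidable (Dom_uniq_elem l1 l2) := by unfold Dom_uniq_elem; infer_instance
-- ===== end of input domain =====

-- B replaces A's nested scan by a one-pass count dict over l2 plus one pass over l1 (alternative algorithm).


-- ===== PORT A =====
def uniq_elem (l1 : List Int) (l2 : List Int) : List Int :=
  l1.foldl (fun listRes i =>
    l2.foldl (fun listRes j => if i = j then listRes ++ [j] else listRes) listRes) []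

-- ===== PORT B =====
def uniq_elem_alt (l1 : List Int) (l2 : List Int) : List Int :=
  let counts := l2.foldl (fun d j => d.insert j (d.getD j 0 + 1)) (PySem.Dict.empty : PySem.Dict Int Int)
  l1.foldl (fun listRes i => listRes ++ List.replicate (counts.getD i 0).toNat i) []

-- ===== PRECONDITION & SPEC =====
def Spec_uniq_elem (l1 : List Int) (l2 : List Int) (out : List Int) : Prop := out = uniq_elem_alt l1 l2
instance (l1 : List Int) (l2 : List Int) (out : List Int) : Decidable (Spec_uniq_elem l1 l2 out) := by unfold Spec_uniq_elem; infer_instance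

-- ===== CLAIM (what is proved, stated in full; the proofs are below) =====
def Claim_equal_uniq_elem : Prop := ∀ (l1 : List Int) (l2 : List Int), Dom_uniq_elem l1 l2 → Spec_uniq_elem l1 l2 (uniq_elem l1 l2)

-- ===== LEMMAS AND PROOFS =====

-- A's inner loop over l2 appends i exactly (l2.count i) times.
theorem inner_loop_eq (i : Int) (l2 acc : List Int) :
    l2.foldl (fun listRes j => if i = j then listRes ++ [j] else listRes) acc
      = acc ++ List.replicate (l2.count i) i := by
  induction l2 generalizing acc with
  | nil => simp
  | cons j t ih =>
    by_cases h : i = j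
    · subst h
      rw [List.foldl_cons, if_pos rfl, ih]
      simp [List.count_cons_self, List.replicate_succ]
    · rw [List.foldl_cons, if_neg h, ih]
      simp [List.count_cons, Ne.symm h]

-- B's count dict looks up to l2.count.
theorem counts_getD (l2 : List Int) (i : Int) :
    ((l2.foldl (fun d j => d.insert j (d.getD j 0 + 1)) (PySem.Dict.empty : PySem.Dict Int Int)).getD i 0)
      = (l2.count i : Int) := by
  rw [PySem.Dict.getD_foldl_insert_add_one]
  simp [PySem.Dict.empty, PySem.Dict.getD, PySem.Dict.get?]

theorem outer_eq (l1 l2 acc : List Int) :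
    l1.foldl (fun listRes i =>
      l2.foldl (fun listRes j => if i = j then listRes ++ [j] else listRes) listRes) acc
    = l1.foldl (fun listRes i =>
        listRes ++ List.replicate (((l2.foldl (fun d j => d.insert j (d.getD j 0 + 1))
          (PySem.Dict.empty : PySem.Dict Int Int)).getD i 0)).toNat i) acc := by
  induction l1 generalizing acc with
  | nil => rfl
  | cons i t ih =>
    rw [List.foldl_cons, List.foldl_cons, inner_loop_eq, counts_getD, Int.toNat_natCast]
    exact ih _

-- ===== VERDICT (by name: the statement is the Claim_ definition above) =====
theorem uniq_elem_spec : Claim_equal_uniq_elem := by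
  intro l1 l2 _
  unfold Spec_uniq_elem uniq_elem uniq_elem_alt
  exact outer_eq l1 l2 []
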